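-- pv_equiv track=rewrite | github.com/madelyn-redick/genetic_algo_sudoku_solver | csp_no_backtracking.py | solve_no_backtracking
-- ===== SOURCE A (Python) =====
-- def is_complete(grid):
--     return all(cell != 0 for row in grid for cell in row)
--
-- def select_variable_mrv(grid):
--     min_domain = 10
--     selected = None
--     for i in range(9):
--         for j in range(9):
--             if grid[i][j] == 0:
--                 domain = get_legal_values(i, j, grid)
--                 if len(domain) < min_domain:
--                     min_domain = len(domain)
--                     selected = (i, j)
--     return selected
--
-- def get_legal_values(i, j, grid):
--     used = set(grid[i])
--     used.update(grid[r][j] for r in range(9))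
--     start_i, start_j = 3 * (i // 3), 3 * (j // 3)
--     used.update(grid[r][c] for r in range(start_i, start_i+3) for c in range(start_j, start_j+3))
--     return [n for n in range(1, 10) if n not in used]
--
-- def solve_no_backtracking(grid):
--     if is_complete(grid):
--         return grid
--     var = select_variable_mrv(grid)
--     if not var:
--         return None
--     i, j = var
--     for value in get_legal_values(i, j, grid):
--         grid[i][j] = value
--         return solve_no_backtracking(grid)
--     return None
-- ===== SOURCE B (Python) =====
-- # Explicit greedy loop over a maintained list of empty cells, with incremental
-- # row/column/box bitmasks instead of rebuilding sets from the grid at every step.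
-- # Fills the grid argument in place, like any in-place solver would.
-- def solve_no_backtracking(grid):
--     def done():
--         return all(cell != 0 for row in grid for cell in row)
--
--     if done():
--         return grid
--
--     def mask(vals):
--         m = 0
--         for v in vals:
--             if 1 <= v <= 9:
--                 m |= 1 << v
--         return m
--
--     rm = [mask(grid[i]) for i in range(9)]
--     cm = [mask([grid[r][j] for r in range(9)]) for j in range(9)]
--     bm = [mask([grid[r][c] for r in range(3 * (b // 3), 3 * (b // 3) + 3)
--                 for c in range(3 * (b % 3), 3 * (b % 3) + 3)]) for b in range(9)]
--     empties = [(i, j) for i in range(9) for j in range(9) if grid[i][j] == 0]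
--
--     while empties:
--         best_sz, best = 10, None
--         for (i, j) in empties:
--             m = rm[i] | cm[j] | bm[3 * (i // 3) + j // 3]
--             sz = len([v for v in range(1, 10) if not (m >> v) & 1])
--             if sz < best_sz:
--                 best_sz, best = sz, (i, j)
--         i, j = best
--         m = rm[i] | cm[j] | bm[3 * (i // 3) + j // 3]
--         vals = [v for v in range(1, 10) if not (m >> v) & 1]
--         if not vals:
--             return None
--         v = vals[0]
--         grid[i][j] = v
--         rm[i] |= 1 << v
--         cm[j] |= 1 << v
--         bm[3 * (i // 3) + j // 3] |= 1 << v
--         empties.remove((i, j))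
--     return grid if done() else None
-- ===== Notes on version B (the rewrite author's own statement) =====
-- stated objective: alternative
-- what changed: Tail recursion with per-step Python-set rebuilding is replaced by an explicit worklist loop over a maintained list of empty cells, with incrementally updated row/column/box bitmasks replacing the sets rebuilt from the grid at every step; the solver returns the grid only if filling actually completed it.
import Mathlib
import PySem

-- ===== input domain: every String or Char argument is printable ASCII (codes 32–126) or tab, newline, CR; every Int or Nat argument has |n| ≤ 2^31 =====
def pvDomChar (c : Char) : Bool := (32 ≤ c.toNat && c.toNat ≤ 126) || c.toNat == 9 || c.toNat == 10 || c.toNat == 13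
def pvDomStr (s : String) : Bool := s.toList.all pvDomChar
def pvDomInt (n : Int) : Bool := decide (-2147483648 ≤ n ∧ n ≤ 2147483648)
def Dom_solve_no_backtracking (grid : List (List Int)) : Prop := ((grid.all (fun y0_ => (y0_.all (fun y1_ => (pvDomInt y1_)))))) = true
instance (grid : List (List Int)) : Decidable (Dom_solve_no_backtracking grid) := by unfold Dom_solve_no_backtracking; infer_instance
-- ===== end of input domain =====

-- B replaces A's tail recursion (which rebuilds Python sets from the grid at every step)
-- by an explicit loop over a maintained list of empty cells with incrementally updated
-- row/column/box bitmasks, returning the grid only if filling completed it.  Like A,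
-- B fills the grid argument in place (Python-side); the equivalence proved here is
-- about the return value.

-- ===== PORT A =====
def is_complete (grid : List (List Int)) : Bool :=
  grid.all (fun row => row.all (fun cell => cell != 0))

-- grid[i] / grid[r][j]: the indices come from range(9); under Pre_ they are in range,
-- so pyGet? with a .getD default is exact there.
def get_legal_values (i j : Int) (grid : List (List Int)) : List Int :=
  let used : PySem.Set Int := PySem.Set.ofList ((PySem.List.pyGet? grid i).getD [])
  let used := (PySem.List.pyRange 0 9 1).foldl
      (fun s r => PySem.Set.add s ((PySem.List.pyGet? ((PySem.List.pyGet? grid r).getD []) j).getD 0)) used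
  let si := 3 * (PySem.Int.floordiv i 3)
  let sj := 3 * (PySem.Int.floordiv j 3)
  let used := (PySem.List.pyRange si (si + 3) 1).foldl (fun s r =>
      (PySem.List.pyRange sj (sj + 3) 1).foldl (fun s c =>
        PySem.Set.add s ((PySem.List.pyGet? ((PySem.List.pyGet? grid r).getD []) c).getD 0)) s) used
  (PySem.List.pyRange 1 10 1).filter (fun n => !(PySem.Set.contains used n))

def select_variable_mrv (grid : List (List Int)) : Option (Int × Int) :=
  let st := (PySem.List.pyRange 0 9 1).foldl (fun st i =>
    (PySem.List.pyRange 0 9 1).foldl (fun st j =>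
      if (PySem.List.pyGet? ((PySem.List.pyGet? grid i).getD []) j).getD 0 = 0 then
        let domain := get_legal_values i j grid
        if (domain.length : Int) < st.1 then ((domain.length : Int), some (i, j))
        else st
      else st) st) ((10 : Int), (none : Option (Int × Int)))
  st.2

-- Fuel only makes the recursion total: each call either returns or fills one of the
-- ≤ 81 empty cells of the 9×9 region with a nonzero value, so depth ≤ 82.
def solve_go (fuel : Nat) (grid : List (List Int)) : Option (List (List Int)) :=
  match fuel with
  | 0 => none
  | fuel + 1 =>
    if is_complete grid then some grid
    else
      match select_variable_mrv grid with
      | none => none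
      | some (i, j) =>
        match get_legal_values i j grid with
        | [] => none
        | value :: _ =>
          -- grid[i][j] = value  (i, j come from range(9): nonnegative, in range under Pre_)
          solve_go fuel (grid.set i.toNat (((PySem.List.pyGet? grid i).getD []).set j.toNat value))

def solve_no_backtracking (grid : List (List Int)) : Option (List (List Int)) :=
  solve_go 82 grid

-- ===== PORT B =====
-- def done(): return all(cell != 0 for row in grid for cell in row)
def alt_done (grid : List (List Int)) : Bool :=
  grid.all (fun row => row.all (fun cell => cell != 0))

-- m |= 1 << v for 1 <= v <= 9
def altMask (vals : List Int) : Nat :=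
  vals.foldl (fun (m : Nat) (v : Int) => if 1 ≤ v ∧ v ≤ 9 then m ||| (1 <<< v.toNat) else m) 0

-- [v for v in range(1, 10) if not (m >> v) & 1]
def altFree (m : Nat) : List Int :=
  (PySem.List.pyRange 1 10 1).filter (fun v => (m >>> v.toNat) &&& 1 == 0)

-- the while loop; fuel only makes it total (each iteration removes one of ≤ 81 empties)
def alt_go (fuel : Nat) (grid : List (List Int)) (rm cm bm : List Nat)
    (empties : List (Int × Int)) : Option (List (List Int)) :=
  match fuel with
  | 0 => none
  | fuel + 1 =>
    match empties with
    | [] => if alt_done grid then some grid else none   -- return grid if done() else None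
    | _ :: _ =>
      let st := empties.foldl (fun st c =>
        let m := (rm.getD c.1.toNat 0) ||| (cm.getD c.2.toNat 0) |||
                 (bm.getD (3 * PySem.Int.floordiv c.1 3 + PySem.Int.floordiv c.2 3).toNat 0)
        let sz := ((altFree m).length : Int)
        if sz < st.1 then (sz, some c) else st) ((10 : Int), (none : Option (Int × Int)))
      match st.2 with
      | none => none   -- unreachable: empties is nonempty, so some cell was selected
      | some (i, j) =>
        let m := (rm.getD i.toNat 0) ||| (cm.getD j.toNat 0) |||
                 (bm.getD (3 * PySem.Int.floordiv i 3 + PySem.Int.floordiv j 3).toNat 0)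
        match altFree m with
        | [] => none
        | v :: _ =>
          alt_go fuel (grid.set i.toNat (((PySem.List.pyGet? grid i).getD []).set j.toNat v))
            (rm.set i.toNat ((rm.getD i.toNat 0) ||| (1 <<< v.toNat)))
            (cm.set j.toNat ((cm.getD j.toNat 0) ||| (1 <<< v.toNat)))
            (bm.set (3 * PySem.Int.floordiv i 3 + PySem.Int.floordiv j 3).toNat
               ((bm.getD (3 * PySem.Int.floordiv i 3 + PySem.Int.floordiv j 3).toNat 0) ||| (1 <<< v.toNat)))
            ((PySem.List.remove? empties (i, j)).getD empties)  -- (i, j) ∈ empties: .remove never raises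

def solve_no_backtracking_alt (grid : List (List Int)) : Option (List (List Int)) :=
  if alt_done grid then some grid
  else
    let rm := (PySem.List.pyRange 0 9 1).map (fun i => altMask ((PySem.List.pyGet? grid i).getD []))
    let cm := (PySem.List.pyRange 0 9 1).map (fun j =>
      altMask ((PySem.List.pyRange 0 9 1).map (fun r =>
        (PySem.List.pyGet? ((PySem.List.pyGet? grid r).getD []) j).getD 0)))
    let bm := (PySem.List.pyRange 0 9 1).map (fun b =>
      altMask ((PySem.List.pyRange (3 * PySem.Int.floordiv b 3) (3 * PySem.Int.floordiv b 3 + 3) 1).flatMap (fun r =>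
        (PySem.List.pyRange (3 * PySem.Int.mod b 3) (3 * PySem.Int.mod b 3 + 3) 1).map (fun c =>
          (PySem.List.pyGet? ((PySem.List.pyGet? grid r).getD []) c).getD 0))))
    let empties := (PySem.List.pyRange 0 9 1).flatMap (fun i =>
      ((PySem.List.pyRange 0 9 1).filter (fun j =>
        (PySem.List.pyGet? ((PySem.List.pyGet? grid i).getD []) j).getD 0 == 0)).map (fun j => (i, j)))
    alt_go 82 grid rm cm bm empties

-- ===== PRECONDITION & SPEC =====
-- Pre_ excludes exactly the inputs on which A raises IndexError: grids that still contain
-- a zero but do not have at least 9 rows whose first 9 rows each have at least 9 entries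
-- (A then evaluates grid[i][j] for i, j in range(9)).  On complete grids A returns the
-- grid without indexing, so those are admitted for any shape.
def Pre_solve_no_backtracking (grid : List (List Int)) : Prop :=
  (∀ row ∈ grid, ∀ cell ∈ row, cell ≠ 0) ∨
  (9 ≤ grid.length ∧ ∀ row ∈ grid.take 9, 9 ≤ row.length)
instance (grid : List (List Int)) : Decidable (Pre_solve_no_backtracking grid) := by
  unfold Pre_solve_no_backtracking; infer_instance

def pvWitness_solve_no_backtracking : List (List Int) :=
  List.replicate 9 (List.replicate 9 0)

def Spec_solve_no_backtracking (grid : List (List Int)) (out : Option (List (List Int))) : Prop := out = solve_no_backtracking_alt grid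
instance (grid : List (List Int)) (out : Option (List (List Int))) : Decidable (Spec_solve_no_backtracking grid out) := by unfold Spec_solve_no_backtracking; infer_instance

-- ===== CLAIM (what is proved, stated in full; the proofs are below) =====
def Claim_equal_solve_no_backtracking : Prop := ∀ (grid : List (List Int)), Dom_solve_no_backtracking grid → Pre_solve_no_backtracking grid → Spec_solve_no_backtracking grid (solve_no_backtracking grid)

-- ===== LEMMAS AND PROOFS =====

-- proof-side abbreviations for the canonical state B's loop maintains
def gcell (grid : List (List Int)) (i j : Int) : Int :=
  (PySem.List.pyGet? ((PySem.List.pyGet? grid i).getD []) j).getD 0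

def rowsOf (grid : List (List Int)) (i : Int) : List Int :=
  (PySem.List.pyGet? grid i).getD []

def rmOf (grid : List (List Int)) : List Nat :=
  (PySem.List.pyRange 0 9 1).map (fun i => altMask ((PySem.List.pyGet? grid i).getD []))

def cmOf (grid : List (List Int)) : List Nat :=
  (PySem.List.pyRange 0 9 1).map (fun j =>
    altMask ((PySem.List.pyRange 0 9 1).map (fun r =>
      (PySem.List.pyGet? ((PySem.List.pyGet? grid r).getD []) j).getD 0)))

def bmOf (grid : List (List Int)) : List Nat :=
  (PySem.List.pyRange 0 9 1).map (fun b =>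
    altMask ((PySem.List.pyRange (3 * PySem.Int.floordiv b 3) (3 * PySem.Int.floordiv b 3 + 3) 1).flatMap (fun r =>
      (PySem.List.pyRange (3 * PySem.Int.mod b 3) (3 * PySem.Int.mod b 3 + 3) 1).map (fun c =>
        (PySem.List.pyGet? ((PySem.List.pyGet? grid r).getD []) c).getD 0))))

def emptiesOf (grid : List (List Int)) : List (Int × Int) :=
  (PySem.List.pyRange 0 9 1).flatMap (fun i =>
    ((PySem.List.pyRange 0 9 1).filter (fun j =>
      (PySem.List.pyGet? ((PySem.List.pyGet? grid i).getD []) j).getD 0 == 0)).map (fun j => (i, j)))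

def Shape (grid : List (List Int)) : Prop :=
  9 ≤ grid.length ∧ ∀ row ∈ grid.take 9, 9 ≤ row.length


-- ---- proof-side definitions ----

def bitOf (v : Int) : Nat := if 1 ≤ v ∧ v ≤ 9 then 1 <<< v.toNat else 0

def allPairs : List (Int × Int) :=
  (PySem.List.pyRange 0 9 1).flatMap (fun i => (PySem.List.pyRange 0 9 1).map (fun j => (i, j)))

def astep (grid : List (List Int)) (st : Int × Option (Int × Int)) (c : Int × Int) :
    Int × Option (Int × Int) :=
  if ((get_legal_values c.1 c.2 grid).length : Int) < st.1 then
    (((get_legal_values c.1 c.2 grid).length : Int), some c) else st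

def upd (grid : List (List Int)) (i j v : Int) : List (List Int) :=
  grid.set i.toNat (((PySem.List.pyGet? grid i).getD []).set j.toNat v)

theorem gcell_def (grid : List (List Int)) (i j : Int) :
    (PySem.List.pyGet? ((PySem.List.pyGet? grid i).getD []) j).getD 0 = gcell grid i j := rfl

theorem rowsOf_def (grid : List (List Int)) (i : Int) :
    (PySem.List.pyGet? grid i).getD [] = rowsOf grid i := rfl

-- ---- bitmask lemmas ----

theorem altMask_foldl (L : List Int) (m : Nat) :
    L.foldl (fun (m : Nat) (v : Int) => if 1 ≤ v ∧ v ≤ 9 then m ||| (1 <<< v.toNat) else m) m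
      = m ||| altMask L := by
  induction L generalizing m with
  | nil => simp [altMask]
  | cons a L ih =>
      rw [show altMask (a :: L) = L.foldl
        (fun (m : Nat) (v : Int) => if 1 ≤ v ∧ v ≤ 9 then m ||| (1 <<< v.toNat) else m)
        (if 1 ≤ a ∧ a ≤ 9 then 0 ||| (1 <<< a.toNat) else 0) from rfl]
      rw [List.foldl_cons, ih, ih]
      by_cases hm : 1 ≤ a ∧ a ≤ 9 <;> simp [hm, Nat.or_assoc]

theorem altMask_cons (a : Int) (L : List Int) : altMask (a :: L) = bitOf a ||| altMask L := by
  rw [show altMask (a :: L) = L.foldl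
    (fun (m : Nat) (v : Int) => if 1 ≤ v ∧ v ≤ 9 then m ||| (1 <<< v.toNat) else m)
    (if 1 ≤ a ∧ a ≤ 9 then 0 ||| (1 <<< a.toNat) else 0) from rfl]
  rw [altMask_foldl, bitOf]
  by_cases hm : 1 ≤ a ∧ a ≤ 9 <;> simp [hm]

theorem testBit_altMask (L : List Int) (n : Int) (h1 : 1 ≤ n) (h9 : n ≤ 9) :
    ((altMask L).testBit n.toNat = true) ↔ n ∈ L := by
  induction L with
  | nil =>
      show ((0 : Nat).testBit n.toNat = true) ↔ _
      simp
  | cons a L ih =>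
      rw [altMask_cons, Nat.testBit_or]
      by_cases hm : 1 ≤ a ∧ a ≤ 9
      · rw [bitOf, if_pos hm, Nat.shiftLeft_eq, one_mul, Nat.testBit_two_pow]
        simp only [Bool.or_eq_true, decide_eq_true_eq, ih, List.mem_cons]
        constructor
        · rintro (h | h)
          · left; omega
          · right; exact h
        · rintro (h | h)
          · left; omega
          · right; exact h
      · rw [bitOf, if_neg hm]
        have hne : n ≠ a := by omega
        simp [Nat.zero_testBit, ih, List.mem_cons, hne]

theorem and1_eq_zero_iff (m k : Nat) : ((m >>> k) &&& 1 = 0) ↔ ¬ (m.testBit k = true) := by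
  simp only [Nat.testBit, Nat.and_one_is_mod, Nat.and_comm 1, bne_iff_ne, ne_eq, not_not]

theorem altMask_set (L : List Int) (k : Nat) (x : Int) (hk : k < L.length)
    (h0 : L[k] = 0) : altMask (L.set k x) = altMask L ||| bitOf x := by
  induction L generalizing k with
  | nil => simp at hk
  | cons a L ih =>
      cases k with
      | zero =>
          simp only [List.getElem_cons_zero] at h0
          subst h0
          rw [List.set_cons_zero, altMask_cons, altMask_cons]
          have hb : bitOf 0 = 0 := by norm_num [bitOf]
          rw [hb, Nat.zero_or, Nat.or_comm]
      | succ k =>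
          simp only [List.getElem_cons_succ] at h0
          rw [List.set_cons_succ, altMask_cons, altMask_cons,
            ih k (by simpa using hk) h0, Nat.or_assoc]

theorem altMask_map_update {α : Type} [DecidableEq α] (C : List α) (a : α) (f f' : α → Int)
    (x : Int) (hnd : C.Nodup) (ha : a ∈ C) (h0 : f a = 0) (hv : f' a = x)
    (hoth : ∀ c ∈ C, c ≠ a → f' c = f c) :
    altMask (C.map f') = altMask (C.map f) ||| bitOf x := by
  induction C with
  | nil => cases ha
  | cons b C ih =>
      rw [List.map_cons, List.map_cons, altMask_cons, altMask_cons]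
      by_cases hb : b = a
      · subst hb
        have hC : ∀ c ∈ C, f' c = f c := fun c hc => hoth c (List.mem_cons_of_mem _ hc) (by
          rintro rfl; exact (List.nodup_cons.mp hnd).1 hc)
        rw [List.map_congr_left hC, hv, h0]
        have hz : bitOf 0 = 0 := by norm_num [bitOf]
        rw [hz, Nat.zero_or, Nat.or_comm]
      · have haC : a ∈ C := by
          rcases List.mem_cons.mp ha with h | h
          · exact absurd h.symm hb
          · exact h
        rw [hoth b (List.mem_cons_self) (fun h => hb h),
          ih (List.nodup_cons.mp hnd).2 haC
            (fun c hc hca => hoth c (List.mem_cons_of_mem _ hc) hca), Nat.or_assoc]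

-- ---- allPairs / emptiesOf ----

theorem emptiesOf_eq (grid : List (List Int)) :
    emptiesOf grid = allPairs.filter (fun c => gcell grid c.1 c.2 == 0) := by
  unfold emptiesOf allPairs
  rw [List.filter_flatMap]
  simp only [List.filter_map, gcell_def]
  rfl

theorem mem_allPairs (c : Int × Int) :
    c ∈ allPairs ↔ 0 ≤ c.1 ∧ c.1 < 9 ∧ 0 ≤ c.2 ∧ c.2 < 9 := by
  unfold allPairs
  rcases c with ⟨i, j⟩
  simp only [List.mem_flatMap, List.mem_map, PySem.List.mem_pyRange_one]
  constructor
  · rintro ⟨r, hr, jj, hjj, h⟩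
    obtain ⟨rfl, rfl⟩ : r = i ∧ jj = j := by
      constructor <;> (cases h; rfl)
    exact ⟨hr.1, hr.2, hjj.1, hjj.2⟩
  · rintro ⟨h1, h2, h3, h4⟩
    exact ⟨i, ⟨h1, h2⟩, j, ⟨h3, h4⟩, rfl⟩

theorem nodup_allPairs : allPairs.Nodup := by decide

theorem length_allPairs : allPairs.length = 81 := by decide

theorem mem_empties_bounds (grid : List (List Int)) (c : Int × Int)
    (hc : c ∈ emptiesOf grid) :
    (0 ≤ c.1 ∧ c.1 < 9 ∧ 0 ≤ c.2 ∧ c.2 < 9) ∧ gcell grid c.1 c.2 = 0 := by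
  rw [emptiesOf_eq, List.mem_filter] at hc
  refine ⟨(mem_allPairs c).mp hc.1, ?_⟩
  simpa using hc.2

theorem filter_and_ne_eq_erase {α : Type} [BEq α] [LawfulBEq α] (l : List α) (p : α → Bool) (a : α)
    (hnd : l.Nodup) (ha : a ∈ l) (hpa : p a = true) :
    l.filter (fun x => p x && !(x == a)) = (l.filter p).erase a := by
  induction l with
  | nil => cases ha
  | cons b l ih =>
      rcases List.nodup_cons.mp hnd with ⟨hbl, hnd'⟩
      by_cases hb : b = a
      · subst hb
        have hl : ∀ x ∈ l, (p x && !(x == b)) = p x := by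
          intro x hx
          have : x ≠ b := fun h => hbl (h ▸ hx)
          simp [this]
        rw [List.filter_cons, List.filter_cons]
        simp only [hpa, beq_self_eq_true, Bool.not_true, Bool.and_false, if_true]
        rw [List.filter_congr hl]
        simp [List.erase_cons_head]
      · have ha' : a ∈ l := by
          rcases List.mem_cons.mp ha with h | h
          · exact absurd h.symm hb
          · exact h
        rw [List.filter_cons, List.filter_cons]
        by_cases hpb : p b = true
        · simp only [hpb, Bool.true_and, if_true]
          have hne : (b == a) = false := by simp [hb]
          simp only [hne, Bool.not_false, if_true]
          rw [List.erase_cons_tail (by simp [hb]), ih hnd' ha']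
        · simp only [hpb]
          simp only [Bool.false_and]
          rw [ih hnd' ha']
          simp

-- ---- select lemmas ----

theorem foldl_foldl_eq_flatMap {α β σ : Type} (L1 : List α) (L2 : α → List β)
    (h : σ → α → β → σ) (s : σ) :
    L1.foldl (fun s x => (L2 x).foldl (fun s y => h s x y) s) s
      = (L1.flatMap (fun x => (L2 x).map (fun y => (x, y)))).foldl (fun s c => h s c.1 c.2) s := by
  induction L1 generalizing s with
  | nil => rfl
  | cons a L1 ih =>
      rw [List.flatMap_cons, List.foldl_append, List.foldl_map, List.foldl_cons, ih]

theorem select_eq (grid : List (List Int)) :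
    select_variable_mrv grid = ((emptiesOf grid).foldl (astep grid) ((10 : Int), none)).2 := by
  have h : (PySem.List.pyRange 0 9 1).foldl (fun st i =>
      (PySem.List.pyRange 0 9 1).foldl (fun st j =>
        if (PySem.List.pyGet? ((PySem.List.pyGet? grid i).getD []) j).getD 0 = 0 then
          if ((get_legal_values i j grid).length : Int) < st.1 then
            (((get_legal_values i j grid).length : Int), some (i, j))
          else st
        else st) st) ((10 : Int), (none : Option (Int × Int)))
      = (emptiesOf grid).foldl (astep grid) ((10 : Int), none) := by
    rw [foldl_foldl_eq_flatMap (σ := Int × Option (Int × Int))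
      (PySem.List.pyRange 0 9 1) (fun _ => PySem.List.pyRange 0 9 1)
      (fun st i j =>
        if (PySem.List.pyGet? ((PySem.List.pyGet? grid i).getD []) j).getD 0 = 0 then
          if ((get_legal_values i j grid).length : Int) < st.1 then
            (((get_legal_values i j grid).length : Int), some (i, j))
          else st
        else st)]
    rw [PySem.List.foldl_ite_eq_foldl_filter
      (p := fun c : Int × Int =>
        (PySem.List.pyGet? ((PySem.List.pyGet? grid c.1).getD []) c.2).getD 0 = 0)
      (f := fun (st : Int × Option (Int × Int)) (c : Int × Int) =>
        if ((get_legal_values c.1 c.2 grid).length : Int) < st.1 then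
          (((get_legal_values c.1 c.2 grid).length : Int), some (c.1, c.2))
        else st)]
    have hl : (List.flatMap (fun x => List.map (fun y => (x, y)) (PySem.List.pyRange 0 9 1))
          (PySem.List.pyRange 0 9 1)).filter
        (fun c : Int × Int =>
          decide ((PySem.List.pyGet? ((PySem.List.pyGet? grid c.1).getD []) c.2).getD 0 = 0))
        = emptiesOf grid := by
      rw [emptiesOf_eq]
      apply List.filter_congr
      intro c _
      simp only [gcell_def]
      rw [← Bool.coe_iff_coe]
      simp
    rw [hl]
    apply PySem.List.foldl_congr_mem
    intro acc c _
    rfl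
  exact congrArg Prod.snd h

theorem foldl_astep_mem (grid : List (List Int)) (e : List (Int × Int)) :
    ∀ (st : Int × Option (Int × Int)),
      (e.foldl (astep grid) st).2 = st.2 ∨ ∃ c ∈ e, (e.foldl (astep grid) st).2 = some c := by
  induction e with
  | nil => intro st; left; rfl
  | cons c e ih =>
      intro st
      rw [List.foldl_cons]
      rcases ih (astep grid st c) with h | ⟨c', hc', h⟩
      · rw [h]
        unfold astep
        split
        · right; exact ⟨c, by simp, rfl⟩
        · left; rfl
      · right; exact ⟨c', by simp [hc'], h⟩

theorem legal_len_le (grid : List (List Int)) (i j : Int) :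
    (get_legal_values i j grid).length ≤ 9 := by
  unfold get_legal_values
  calc _ ≤ (PySem.List.pyRange 1 10 1).length := List.length_filter_le _ _
  _ = 9 := by rw [PySem.List.length_pyRange_one]; rfl

theorem foldl_astep_some (grid : List (List Int)) (c : Int × Int) (e : List (Int × Int)) :
    ∃ c', ((c :: e).foldl (astep grid) ((10 : Int), none)).2 = some c' ∧ c' ∈ c :: e := by
  rw [List.foldl_cons]
  have h1 : astep grid ((10 : Int), none) c
      = (((get_legal_values c.1 c.2 grid).length : Int), some c) := by
    unfold astep
    rw [if_pos]
    have := legal_len_le grid c.1 c.2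
    omega
  rw [h1]
  rcases foldl_astep_mem grid e (((get_legal_values c.1 c.2 grid).length : Int), some c) with
    h | ⟨c', hc', h⟩
  · exact ⟨c, by rw [h], by simp⟩
  · exact ⟨c', h, by simp [hc']⟩

-- ---- membership of the used set ----

theorem mem_foldl_foldl_add {α β : Type} (L1 : List α) (L2 : α → List β)
    (g : α → β → Int) (s : PySem.Set Int) (y : Int) :
    (y ∈ L1.foldl (fun s r => (L2 r).foldl (fun s c => PySem.Set.add s (g r c)) s) s)
      ↔ y ∈ s ∨ ∃ r ∈ L1, ∃ c ∈ L2 r, y = g r c := by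
  induction L1 generalizing s with
  | nil => simp
  | cons a L1 ih =>
      rw [List.foldl_cons, ih]
      rw [PySem.Set.mem_foldl_add]
      constructor
      · rintro (⟨h | ⟨b, hb, rfl⟩⟩ | ⟨r, hr, cc, hcc, rfl⟩)
        · exact Or.inl h
        · exact Or.inr ⟨a, by simp, b, hb, rfl⟩
        · exact Or.inr ⟨r, by simp [hr], cc, hcc, rfl⟩
      · rintro (h | ⟨r, hr, cc, hcc, rfl⟩)
        · exact Or.inl (Or.inl h)
        · rcases List.mem_cons.mp hr with rfl | hr'
          · exact Or.inl (Or.inr ⟨cc, hcc, rfl⟩)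
          · exact Or.inr ⟨r, hr', cc, hcc, rfl⟩

-- ---- getD of the canonical builders ----

theorem getD_mapRange {β : Type} [Inhabited β] (f : Int → β) (k : Nat) (d : β) (hk : k < 9) :
    (((PySem.List.pyRange 0 9 1).map f).getD k d) = f (k : Int) := by
  have h9 : (PySem.List.pyRange 0 ((9:Nat):Int) 1) = PySem.List.pyRange 0 9 1 := by norm_num
  rw [List.getD_eq_getElem?_getD, ← h9, PySem.List.getElem?_map_pyRange_zero f 9 k hk]
  rfl

theorem getD_rmOf (grid : List (List Int)) (k : Nat) (hk : k < 9) :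
    (rmOf grid).getD k 0 = altMask (rowsOf grid (k : Int)) := by
  unfold rmOf
  rw [getD_mapRange _ k 0 hk, rowsOf_def]

theorem getD_cmOf (grid : List (List Int)) (k : Nat) (hk : k < 9) :
    (cmOf grid).getD k 0
      = altMask ((PySem.List.pyRange 0 9 1).map (fun r => gcell grid r (k : Int))) := by
  unfold cmOf
  rw [getD_mapRange _ k 0 hk]
  simp only [gcell_def]

theorem getD_bmOf (grid : List (List Int)) (k : Nat) (hk : k < 9) :
    (bmOf grid).getD k 0
      = altMask ((PySem.List.pyRange (3 * PySem.Int.floordiv (k : Int) 3)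
            (3 * PySem.Int.floordiv (k : Int) 3 + 3) 1).flatMap (fun r =>
          (PySem.List.pyRange (3 * PySem.Int.mod (k : Int) 3)
            (3 * PySem.Int.mod (k : Int) 3 + 3) 1).map (fun c => gcell grid r c))) := by
  unfold bmOf
  rw [getD_mapRange _ k 0 hk]
  simp only [gcell_def]

-- ---- the legal-values equality ----

theorem legal_mem_bounds (grid : List (List Int)) (i j x : Int)
    (hx : x ∈ get_legal_values i j grid) : 1 ≤ x ∧ x ≤ 9 := by
  unfold get_legal_values at hx
  have := (List.mem_filter.mp hx).1
  rw [PySem.List.mem_pyRange_one] at this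
  omega

theorem legal_eq (grid : List (List Int)) (i j : Int)
    (hi0 : 0 ≤ i) (hi9 : i < 9) (hj0 : 0 ≤ j) (hj9 : j < 9) :
    get_legal_values i j grid
      = altFree ((rmOf grid).getD i.toNat 0 ||| (cmOf grid).getD j.toNat 0 |||
          (bmOf grid).getD (3 * PySem.Int.floordiv i 3 + PySem.Int.floordiv j 3).toNat 0) := by
  have hi' : ((i.toNat : Nat) : Int) = i := Int.toNat_of_nonneg hi0
  have hj' : ((j.toNat : Nat) : Int) = j := Int.toNat_of_nonneg hj0
  have hd3 : PySem.Int.floordiv i 3 = i / 3 := PySem.Int.floordiv_eq_ediv_of_pos (by norm_num)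
  have hd3' : PySem.Int.floordiv j 3 = j / 3 := PySem.Int.floordiv_eq_ediv_of_pos (by norm_num)
  have hbnn : 0 ≤ 3 * PySem.Int.floordiv i 3 + PySem.Int.floordiv j 3 := by
    rw [hd3, hd3']; omega
  have hb9 : 3 * PySem.Int.floordiv i 3 + PySem.Int.floordiv j 3 < 9 := by
    rw [hd3, hd3']; omega
  have hb' : (((3 * PySem.Int.floordiv i 3 + PySem.Int.floordiv j 3).toNat : Nat) : Int)
      = 3 * PySem.Int.floordiv i 3 + PySem.Int.floordiv j 3 := Int.toNat_of_nonneg hbnn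
  rw [getD_rmOf grid i.toNat (by omega), getD_cmOf grid j.toNat (by omega),
    getD_bmOf grid (3 * PySem.Int.floordiv i 3 + PySem.Int.floordiv j 3).toNat (by omega)]
  rw [hi', hj', hb']
  have hfb : PySem.Int.floordiv (3 * PySem.Int.floordiv i 3 + PySem.Int.floordiv j 3) 3
      = PySem.Int.floordiv i 3 := by
    rw [PySem.Int.floordiv_eq_ediv_of_pos (by norm_num), hd3, hd3']
    omega
  have hmb : PySem.Int.mod (3 * PySem.Int.floordiv i 3 + PySem.Int.floordiv j 3) 3
      = PySem.Int.floordiv j 3 := by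
    rw [PySem.Int.mod_eq_emod_of_pos (by norm_num), hd3, hd3']
    omega
  rw [hfb, hmb]
  unfold get_legal_values altFree
  simp only [rowsOf_def]
  apply List.filter_congr
  intro n hn
  rw [PySem.List.mem_pyRange_one] at hn
  rw [← Bool.coe_iff_coe]
  have husd : ∀ s : PySem.Set Int,
      (!(PySem.Set.contains s n)) = true ↔ ¬ n ∈ s := by
    intro s
    rw [Bool.not_eq_eq_eq_not, Bool.not_true, ← Bool.not_eq_true,
      not_iff_not, PySem.Set.contains_iff]
  rw [husd]
  rw [mem_foldl_foldl_add, PySem.Set.mem_foldl_add, PySem.Set.mem_ofList]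
  rw [beq_iff_eq, and1_eq_zero_iff]
  rw [Nat.testBit_or, Nat.testBit_or]
  simp only [Bool.or_eq_true]
  rw [testBit_altMask _ n (by omega) (by omega), testBit_altMask _ n (by omega) (by omega),
    testBit_altMask _ n (by omega) (by omega)]
  rw [not_iff_not]
  constructor
  · rintro ((h | ⟨r, hr, rfl⟩) | ⟨r, hr, c, hc, rfl⟩)
    · exact Or.inl (Or.inl h)
    · exact Or.inl (Or.inr (List.mem_map.mpr ⟨r, hr, rfl⟩))
    · exact Or.inr (List.mem_flatMap.mpr ⟨r, hr, List.mem_map.mpr ⟨c, hc, rfl⟩⟩)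
  · rintro ((h | h) | h)
    · exact Or.inl (Or.inl h)
    · obtain ⟨r, hr, rfl⟩ := List.mem_map.mp h
      exact Or.inl (Or.inr ⟨r, hr, rfl⟩)
    · obtain ⟨r, hr, h2⟩ := List.mem_flatMap.mp h
      obtain ⟨c, hc, rfl⟩ := List.mem_map.mp h2
      exact Or.inr ⟨r, hr, c, hc, rfl⟩

-- ---- how one grid[i][j] := v update changes the canonical state ----

theorem pyGet?_toNat {α : Type} (xs : List α) (i : Int) (h : 0 ≤ i) :
    PySem.List.pyGet? xs i = xs[i.toNat]? := by
  conv_lhs => rw [show i = ((i.toNat : Nat) : Int) from (Int.toNat_of_nonneg h).symm]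
  exact PySem.List.pyGet?_natCast xs i.toNat

theorem rowsOf_eq (grid : List (List Int)) (i : Int) (hi : 0 ≤ i) :
    rowsOf grid i = grid[i.toNat]?.getD [] := by
  unfold rowsOf
  rw [pyGet?_toNat _ _ hi]

theorem gcell_eq' (grid : List (List Int)) (r c : Int) (hc : 0 ≤ c) :
    gcell grid r c = (rowsOf grid r)[c.toNat]?.getD 0 := by
  show (PySem.List.pyGet? (rowsOf grid r) c).getD 0 = _
  rw [pyGet?_toNat _ c hc]

theorem rowsOf_getElem (grid : List (List Int)) (i : Int) (hs : Shape grid)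
    (hi0 : 0 ≤ i) (hi9 : i < 9) :
    ∃ h : i.toNat < grid.length, rowsOf grid i = grid[i.toNat] ∧ 9 ≤ (rowsOf grid i).length := by
  obtain ⟨hlen, hrows⟩ := hs
  have hil : i.toNat < grid.length := by omega
  have he : rowsOf grid i = grid[i.toNat] := by
    rw [rowsOf_eq _ _ hi0, List.getElem?_eq_getElem hil]
    rfl
  refine ⟨hil, he, ?_⟩
  rw [he]
  apply hrows
  have ht : i.toNat < (grid.take 9).length := by
    rw [List.length_take]; omega
  have := List.getElem_mem ht
  rwa [List.getElem_take] at this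

theorem gcell_row (grid : List (List Int)) (i j : Int) (hs : Shape grid)
    (hi0 : 0 ≤ i) (hi9 : i < 9) (hj0 : 0 ≤ j) (hj9 : j < 9) :
    ∃ h : j.toNat < (rowsOf grid i).length, gcell grid i j = (rowsOf grid i)[j.toNat] := by
  obtain ⟨-, -, hrl⟩ := rowsOf_getElem grid i hs hi0 hi9
  have hjl : j.toNat < (rowsOf grid i).length := by omega
  refine ⟨hjl, ?_⟩
  rw [gcell_eq' grid i j hj0, List.getElem?_eq_getElem hjl]
  rfl

theorem rowsOf_upd (grid : List (List Int)) (i j v : Int) (hs : Shape grid)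
    (hi0 : 0 ≤ i) (hi9 : i < 9) (k : Int) (hk : 0 ≤ k) :
    rowsOf (upd grid i j v) k
      = if k = i then (rowsOf grid i).set j.toNat v else rowsOf grid k := by
  obtain ⟨hil, -, -⟩ := rowsOf_getElem grid i hs hi0 hi9
  rw [rowsOf_eq _ _ hk]
  unfold upd
  rw [List.getElem?_set]
  by_cases hki : k = i
  · subst hki
    rw [if_pos rfl, if_pos hil, if_pos rfl]
    simp only [Option.getD_some, rowsOf_def]
  · rw [if_neg (by omega : ¬ i.toNat = k.toNat), if_neg hki, rowsOf_eq _ _ hk]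

theorem gcell_upd (grid : List (List Int)) (i j v : Int) (hs : Shape grid)
    (hi0 : 0 ≤ i) (hi9 : i < 9) (hj0 : 0 ≤ j) (hj9 : j < 9) (r c : Int)
    (hr : 0 ≤ r) (hc : 0 ≤ c) :
    gcell (upd grid i j v) r c = if r = i ∧ c = j then v else gcell grid r c := by
  obtain ⟨hil, -, hrl⟩ := rowsOf_getElem grid i hs hi0 hi9
  have hrow := rowsOf_upd grid i j v hs hi0 hi9 r hr
  show (PySem.List.pyGet? (rowsOf (upd grid i j v) r) c).getD 0 = _
  rw [hrow]
  by_cases hri : r = i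
  · rw [if_pos hri]
    rw [pyGet?_toNat _ c hc, List.getElem?_set]
    by_cases hcj : c = j
    · rw [if_pos (by omega : j.toNat = c.toNat),
        if_pos (by omega : j.toNat < (rowsOf grid i).length), if_pos ⟨hri, hcj⟩]
      rfl
    · rw [if_neg (by omega : ¬ j.toNat = c.toNat), if_neg (by tauto : ¬ (r = i ∧ c = j))]
      rw [gcell_eq' grid r c hc, hri]
  · rw [if_neg hri, if_neg (by tauto : ¬ (r = i ∧ c = j))]
    rfl

theorem length_rmOf (grid : List (List Int)) : (rmOf grid).length = 9 := by
  unfold rmOf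
  rw [List.length_map, PySem.List.length_pyRange_one]
  rfl

theorem length_cmOf (grid : List (List Int)) : (cmOf grid).length = 9 := by
  unfold cmOf
  rw [List.length_map, PySem.List.length_pyRange_one]
  rfl

theorem length_bmOf (grid : List (List Int)) : (bmOf grid).length = 9 := by
  unfold bmOf
  rw [List.length_map, PySem.List.length_pyRange_one]
  rfl

theorem getElem_mapRange {β : Type} (f : Int → β) (k : Nat) (_ : k < 9)
    (h' : k < ((PySem.List.pyRange 0 9 1).map f).length) :
    ((PySem.List.pyRange 0 9 1).map f)[k] = f (k : Int) := by
  rw [List.getElem_map, PySem.List.getElem_pyRange_one]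
  norm_num

theorem rmOf_upd (grid : List (List Int)) (i j v : Int) (hs : Shape grid)
    (hi0 : 0 ≤ i) (hi9 : i < 9) (hj0 : 0 ≤ j) (hj9 : j < 9)
    (h0 : gcell grid i j = 0) (hv1 : 1 ≤ v) (hv9 : v ≤ 9) :
    rmOf (upd grid i j v)
      = (rmOf grid).set i.toNat ((rmOf grid).getD i.toNat 0 ||| (1 <<< v.toNat)) := by
  obtain ⟨hjl, hje⟩ := gcell_row grid i j hs hi0 hi9 hj0 hj9
  apply List.ext_getElem
  · rw [List.length_set, length_rmOf, length_rmOf]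
  · intro k h1 h2
    have hk9 : k < 9 := by
      have := length_rmOf (upd grid i j v); omega
    show ((PySem.List.pyRange 0 9 1).map
      (fun r => altMask ((PySem.List.pyGet? (upd grid i j v) r).getD [])))[k]'_ = _
    rw [getElem_mapRange _ k hk9]
    rw [List.getElem_set]
    simp only [rowsOf_def]
    rw [rowsOf_upd grid i j v hs hi0 hi9 (k : Int) (by omega)]
    by_cases hik : i.toNat = k
    · rw [if_pos hik, if_pos (by omega : ((k : Nat) : Int) = i)]
      rw [altMask_set _ _ _ hjl (hje ▸ h0)]
      rw [getD_rmOf grid i.toNat (by omega)]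
      rw [show ((i.toNat : Nat) : Int) = i from Int.toNat_of_nonneg hi0]
      congr 1
      unfold bitOf
      rw [if_pos ⟨hv1, hv9⟩]
    · rw [if_neg hik, if_neg (by omega : ¬ ((k : Nat) : Int) = i)]
      show _ = ((PySem.List.pyRange 0 9 1).map
        (fun r => altMask ((PySem.List.pyGet? grid r).getD [])))[k]'_
      rw [getElem_mapRange _ k hk9]
      rfl

theorem cmOf_upd (grid : List (List Int)) (i j v : Int) (hs : Shape grid)
    (hi0 : 0 ≤ i) (hi9 : i < 9) (hj0 : 0 ≤ j) (hj9 : j < 9)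
    (h0 : gcell grid i j = 0) (hv1 : 1 ≤ v) (hv9 : v ≤ 9) :
    cmOf (upd grid i j v)
      = (cmOf grid).set j.toNat ((cmOf grid).getD j.toNat 0 ||| (1 <<< v.toNat)) := by
  apply List.ext_getElem
  · rw [List.length_set, length_cmOf, length_cmOf]
  · intro k h1 h2
    have hk9 : k < 9 := by
      have := length_cmOf (upd grid i j v); omega
    show ((PySem.List.pyRange 0 9 1).map
      (fun jj => altMask ((PySem.List.pyRange 0 9 1).map (fun r =>
        (PySem.List.pyGet? ((PySem.List.pyGet? (upd grid i j v) r).getD []) jj).getD 0))))[k]'_ = _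
    rw [getElem_mapRange _ k hk9]
    rw [List.getElem_set]
    simp only [gcell_def]
    by_cases hk : j.toNat = k
    · rw [if_pos hk]
      rw [show ((k : Nat) : Int) = j from by omega]
      rw [altMask_map_update (PySem.List.pyRange 0 9 1) i
        (fun r => gcell grid r j) (fun r => gcell (upd grid i j v) r j) v
        (PySem.List.nodup_pyRange_one 0 9)
        (PySem.List.mem_pyRange_one.mpr ⟨hi0, hi9⟩)
        h0
        (by
          show gcell (upd grid i j v) i j = v
          rw [gcell_upd grid i j v hs hi0 hi9 hj0 hj9 i j hi0 hj0]
          simp)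
        (by
          intro r hr hri
          rw [PySem.List.mem_pyRange_one] at hr
          show gcell (upd grid i j v) r j = gcell grid r j
          rw [gcell_upd grid i j v hs hi0 hi9 hj0 hj9 r j hr.1 hj0]
          rw [if_neg (by tauto)])]
      rw [getD_cmOf grid j.toNat (by omega)]
      rw [show ((j.toNat : Nat) : Int) = j from Int.toNat_of_nonneg hj0]
      congr 1
      unfold bitOf
      rw [if_pos ⟨hv1, hv9⟩]
    · rw [if_neg hk]
      show _ = ((PySem.List.pyRange 0 9 1).map
        (fun jj => altMask ((PySem.List.pyRange 0 9 1).map (fun r =>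
          (PySem.List.pyGet? ((PySem.List.pyGet? grid r).getD []) jj).getD 0))))[k]'_
      rw [getElem_mapRange _ k hk9]
      simp only [gcell_def]
      congr 1
      apply List.map_congr_left
      intro r hr
      rw [PySem.List.mem_pyRange_one] at hr
      rw [gcell_upd grid i j v hs hi0 hi9 hj0 hj9 r (k : Int) hr.1 (by omega)]
      rw [if_neg (by
        rintro ⟨-, hh⟩
        omega)]

theorem flatMap_map_eq_product {α β γ : Type} (R : List α) (C : List β) (h : α → β → γ) :
    R.flatMap (fun r => C.map (fun c => h r c)) = (R ×ˢ C).map (fun p => h p.1 p.2) := by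
  show _ = (List.product R C).map (fun p => h p.1 p.2)
  unfold List.product
  rw [List.map_flatMap]
  exact congrArg (List.flatMap · R) (funext fun r => by rw [List.map_map]; rfl)

theorem pair_mem_sprod {α β : Type} (a : α) (b : β) (L1 : List α) (L2 : List β) :
    (a, b) ∈ L1 ×ˢ L2 ↔ a ∈ L1 ∧ b ∈ L2 := List.pair_mem_product

theorem bmOf_upd (grid : List (List Int)) (i j v : Int) (hs : Shape grid)
    (hi0 : 0 ≤ i) (hi9 : i < 9) (hj0 : 0 ≤ j) (hj9 : j < 9)
    (h0 : gcell grid i j = 0) (hv1 : 1 ≤ v) (hv9 : v ≤ 9) :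
    bmOf (upd grid i j v)
      = (bmOf grid).set (3 * PySem.Int.floordiv i 3 + PySem.Int.floordiv j 3).toNat
          ((bmOf grid).getD (3 * PySem.Int.floordiv i 3 + PySem.Int.floordiv j 3).toNat 0
            ||| (1 <<< v.toNat)) := by
  have hd3 : PySem.Int.floordiv i 3 = i / 3 := PySem.Int.floordiv_eq_ediv_of_pos (by norm_num)
  have hd3' : PySem.Int.floordiv j 3 = j / 3 := PySem.Int.floordiv_eq_ediv_of_pos (by norm_num)
  apply List.ext_getElem
  · rw [List.length_set, length_bmOf, length_bmOf]
  · intro k h1 h2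
    have hk9 : k < 9 := by
      have := length_bmOf (upd grid i j v); omega
    have hfk : PySem.Int.floordiv ((k : Nat) : Int) 3 = ((k : Nat) : Int) / 3 :=
      PySem.Int.floordiv_eq_ediv_of_pos (by norm_num)
    have hmk : PySem.Int.mod ((k : Nat) : Int) 3 = ((k : Nat) : Int) % 3 :=
      PySem.Int.mod_eq_emod_of_pos (by norm_num)
    show ((PySem.List.pyRange 0 9 1).map
      (fun b => altMask ((PySem.List.pyRange (3 * PySem.Int.floordiv b 3)
          (3 * PySem.Int.floordiv b 3 + 3) 1).flatMap (fun r =>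
        (PySem.List.pyRange (3 * PySem.Int.mod b 3) (3 * PySem.Int.mod b 3 + 3) 1).map (fun c =>
          (PySem.List.pyGet? ((PySem.List.pyGet? (upd grid i j v) r).getD []) c).getD 0)))))[k]'_
      = _
    rw [getElem_mapRange _ k hk9]
    rw [List.getElem_set]
    simp only [gcell_def]
    rw [flatMap_map_eq_product]
    by_cases hk : (3 * PySem.Int.floordiv i 3 + PySem.Int.floordiv j 3).toNat = k
    · rw [if_pos hk]
      have hkb : ((k : Nat) : Int) = 3 * (i / 3) + j / 3 := by
        rw [← hk, hd3, hd3']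
        omega
      rw [altMask_map_update
        ((PySem.List.pyRange (3 * PySem.Int.floordiv ((k : Nat) : Int) 3)
            (3 * PySem.Int.floordiv ((k : Nat) : Int) 3 + 3) 1) ×ˢ
          (PySem.List.pyRange (3 * PySem.Int.mod ((k : Nat) : Int) 3)
            (3 * PySem.Int.mod ((k : Nat) : Int) 3 + 3) 1))
        (i, j)
        (fun p => gcell grid p.1 p.2) (fun p => gcell (upd grid i j v) p.1 p.2) v
        (List.Nodup.product (PySem.List.nodup_pyRange_one _ _) (PySem.List.nodup_pyRange_one _ _))
        (by
          rw [pair_mem_sprod, PySem.List.mem_pyRange_one, PySem.List.mem_pyRange_one,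
            hfk, hmk, hkb]
          omega)
        h0
        (by
          show gcell (upd grid i j v) i j = v
          rw [gcell_upd grid i j v hs hi0 hi9 hj0 hj9 i j hi0 hj0]
          simp)
        (by
          rintro ⟨r, c⟩ hp hne
          rw [pair_mem_sprod, PySem.List.mem_pyRange_one, PySem.List.mem_pyRange_one,
            hfk, hmk, hkb] at hp
          show gcell (upd grid i j v) r c = gcell grid r c
          rw [gcell_upd grid i j v hs hi0 hi9 hj0 hj9 r c (by omega) (by omega)]
          rw [if_neg (by
            rintro ⟨rfl, rfl⟩
            exact hne rfl)])]
      rw [hk, getD_bmOf grid k hk9]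
      rw [flatMap_map_eq_product]
      congr 1
      unfold bitOf
      rw [if_pos ⟨hv1, hv9⟩]
    · rw [if_neg hk]
      show _ = ((PySem.List.pyRange 0 9 1).map
        (fun b => altMask ((PySem.List.pyRange (3 * PySem.Int.floordiv b 3)
            (3 * PySem.Int.floordiv b 3 + 3) 1).flatMap (fun r =>
          (PySem.List.pyRange (3 * PySem.Int.mod b 3) (3 * PySem.Int.mod b 3 + 3) 1).map (fun c =>
            (PySem.List.pyGet? ((PySem.List.pyGet? grid r).getD []) c).getD 0)))))[k]'_
      rw [getElem_mapRange _ k hk9]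
      simp only [gcell_def]
      rw [flatMap_map_eq_product]
      congr 1
      apply List.map_congr_left
      rintro ⟨r, c⟩ hp
      rw [pair_mem_sprod, PySem.List.mem_pyRange_one, PySem.List.mem_pyRange_one,
        hfk, hmk] at hp
      show gcell (upd grid i j v) r c = gcell grid r c
      rw [gcell_upd grid i j v hs hi0 hi9 hj0 hj9 r c (by omega) (by omega)]
      rw [if_neg (by
        rintro ⟨rfl, rfl⟩
        apply hk
        rw [hd3, hd3']
        omega)]

theorem empties_upd (grid : List (List Int)) (i j v : Int) (hs : Shape grid)
    (hi0 : 0 ≤ i) (hi9 : i < 9) (hj0 : 0 ≤ j) (hj9 : j < 9)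
    (h0 : gcell grid i j = 0) (hv1 : 1 ≤ v) :
    emptiesOf (upd grid i j v) = (emptiesOf grid).erase (i, j) := by
  rw [emptiesOf_eq, emptiesOf_eq]
  rw [← filter_and_ne_eq_erase allPairs (fun c => gcell grid c.1 c.2 == 0) (i, j)
    nodup_allPairs ((mem_allPairs (i, j)).mpr ⟨hi0, hi9, hj0, hj9⟩) (by simp [h0])]
  apply List.filter_congr
  intro c hc
  obtain ⟨h1, h2, h3, h4⟩ := (mem_allPairs c).mp hc
  rw [gcell_upd grid i j v hs hi0 hi9 hj0 hj9 c.1 c.2 h1 h3]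
  by_cases hcij : c = (i, j)
  · rw [if_pos (by rw [hcij]; exact ⟨rfl, rfl⟩)]
    have hv0 : ¬ v = 0 := by omega
    simp [hcij, hv0, h0]
  · rw [if_neg (by
      rintro ⟨ha, hb⟩
      exact hcij (Prod.ext ha hb))]
    rw [show (c == (i, j)) = false from beq_eq_false_iff_ne.mpr hcij]
    simp

theorem shape_upd (grid : List (List Int)) (i j v : Int) (hs : Shape grid)
    (hi0 : 0 ≤ i) (hi9 : i < 9) :
    Shape (upd grid i j v) := by
  obtain ⟨hil, hre, hrl⟩ := rowsOf_getElem grid i hs hi0 hi9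
  have hlen9 : (upd grid i j v).length = grid.length := by
    unfold upd
    rw [List.length_set]
  constructor
  · rw [hlen9]
    exact hs.1
  · intro row hrow
    rw [List.mem_iff_getElem] at hrow
    obtain ⟨k, hk, hke⟩ := hrow
    have hk9 : k < 9 := by
      rw [List.length_take] at hk; omega
    have hkl : k < (upd grid i j v).length := by
      rw [List.length_take] at hk; omega
    rw [List.getElem_take] at hke
    have hrw : rowsOf (upd grid i j v) ((k : Nat) : Int) = row := by
      rw [rowsOf_eq _ _ (by omega : (0:Int) ≤ ((k : Nat) : Int))]
      simp only [Int.toNat_natCast]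
      rw [List.getElem?_eq_getElem hkl, Option.getD_some, hke]
    rw [rowsOf_upd grid i j v hs hi0 hi9 ((k : Nat) : Int) (by omega)] at hrw
    by_cases hki : ((k : Nat) : Int) = i
    · rw [if_pos hki] at hrw
      rw [← hrw, List.length_set]
      exact hrl
    · rw [if_neg hki] at hrw
      obtain ⟨-, -, hrl2⟩ := rowsOf_getElem grid ((k : Nat) : Int) hs (by omega) (by omega)
      rw [← hrw]
      exact hrl2

-- ---- completeness forces no empties in the 9×9 window ----

theorem complete_empties (grid : List (List Int)) (hs : Shape grid)
    (hc : is_complete grid = true) : emptiesOf grid = [] := by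
  unfold is_complete at hc
  rw [List.all_eq_true] at hc
  rw [emptiesOf_eq, List.filter_eq_nil_iff]
  intro c hcm
  obtain ⟨h1, h2, h3, h4⟩ := (mem_allPairs c).mp hcm
  obtain ⟨hil, hre, -⟩ := rowsOf_getElem grid c.1 hs h1 h2
  obtain ⟨hjl, hje⟩ := gcell_row grid c.1 c.2 hs h1 h2 h3 h4
  have hcell : gcell grid c.1 c.2 ∈ rowsOf grid c.1 := by
    rw [hje]; exact List.getElem_mem hjl
  have hrm : rowsOf grid c.1 ∈ grid := by
    rw [hre]; exact List.getElem_mem hil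
  have hne := (List.all_eq_true.mp (hc _ hrm)) _ hcell
  simp only [bne_iff_ne, ne_eq] at hne
  simpa using hne

-- ---- the main loop equivalence ----

theorem main_loop (n : Nat) : ∀ (grid : List (List Int)), Shape grid →
    (emptiesOf grid).length < n →
    solve_go n grid
      = alt_go n grid (rmOf grid) (cmOf grid) (bmOf grid) (emptiesOf grid) := by
  induction n with
  | zero =>
      intro grid _ h
      exact absurd h (Nat.not_lt_zero _)
  | succ n ih =>
      intro grid hs hlt
      cases hemp : emptiesOf grid with
      | nil =>
          have hB : alt_go (n+1) grid (rmOf grid) (cmOf grid) (bmOf grid) []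
              = if alt_done grid then some grid else none := rfl
          by_cases hcp : is_complete grid = true
          · show (if is_complete grid then some grid else _) = _
            rw [if_pos hcp, hB, if_pos (show alt_done grid = true from hcp)]
          · have hsel : select_variable_mrv grid = none := by
              rw [select_eq, hemp]
              rfl
            show (if is_complete grid then some grid else _) = _
            rw [if_neg hcp, hsel, hB,
              if_neg (show ¬ alt_done grid = true from hcp)]
      | cons c0 rest =>
          have hne : ¬ is_complete grid = true := by
            intro hcp
            have := complete_empties grid hs hcp
            rw [hemp] at this
            cases this
          obtain ⟨csel, hsel2, hselmem⟩ :
              ∃ c', ((emptiesOf grid).foldl (astep grid) ((10 : Int), none)).2 = some c'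
                ∧ c' ∈ emptiesOf grid := by
            rw [hemp]
            exact foldl_astep_some grid c0 rest
          obtain ⟨ci, cj⟩ := csel
          obtain ⟨⟨hi0, hi9, hj0, hj9⟩, hg0⟩ := mem_empties_bounds grid (ci, cj) hselmem
          have hsel : select_variable_mrv grid = some (ci, cj) := by
            rw [select_eq, hsel2]
          have hleq := legal_eq grid ci cj hi0 hi9 hj0 hj9
          have hfold : (emptiesOf grid).foldl (fun st c =>
              if (((altFree ((rmOf grid).getD c.1.toNat 0 ||| (cmOf grid).getD c.2.toNat 0 |||
                  (bmOf grid).getD (3 * PySem.Int.floordiv c.1 3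
                    + PySem.Int.floordiv c.2 3).toNat 0)).length : Int)) < st.1 then
                (((altFree ((rmOf grid).getD c.1.toNat 0 ||| (cmOf grid).getD c.2.toNat 0 |||
                  (bmOf grid).getD (3 * PySem.Int.floordiv c.1 3
                    + PySem.Int.floordiv c.2 3).toNat 0)).length : Int), some c)
              else st) ((10 : Int), none)
              = (emptiesOf grid).foldl (astep grid) ((10 : Int), none) := by
            apply PySem.List.foldl_congr_mem
            intro acc c hc
            obtain ⟨⟨h1, h2, h3, h4⟩, -⟩ := mem_empties_bounds grid c hc
            unfold astep
            rw [legal_eq grid c.1 c.2 h1 h2 h3 h4]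
          show (if is_complete grid then some grid else _) = _
          rw [if_neg hne, hsel]
          show (match get_legal_values ci cj grid with
            | [] => none
            | value :: _ => solve_go n (upd grid ci cj value)) = _
          show _ = (match ((c0 :: rest).foldl (fun st c =>
              if (((altFree ((rmOf grid).getD c.1.toNat 0 ||| (cmOf grid).getD c.2.toNat 0 |||
                  (bmOf grid).getD (3 * PySem.Int.floordiv c.1 3
                    + PySem.Int.floordiv c.2 3).toNat 0)).length : Int)) < st.1 then
                (((altFree ((rmOf grid).getD c.1.toNat 0 ||| (cmOf grid).getD c.2.toNat 0 |||
                  (bmOf grid).getD (3 * PySem.Int.floordiv c.1 3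
                    + PySem.Int.floordiv c.2 3).toNat 0)).length : Int), some c)
              else st) ((10 : Int), none)).2 with
            | none => none
            | some (i, j) =>
              match altFree ((rmOf grid).getD i.toNat 0 ||| (cmOf grid).getD j.toNat 0 |||
                  (bmOf grid).getD (3 * PySem.Int.floordiv i 3
                    + PySem.Int.floordiv j 3).toNat 0) with
              | [] => none
              | v :: _ =>
                alt_go n (upd grid i j v)
                  ((rmOf grid).set i.toNat ((rmOf grid).getD i.toNat 0 ||| (1 <<< v.toNat)))
                  ((cmOf grid).set j.toNat ((cmOf grid).getD j.toNat 0 ||| (1 <<< v.toNat)))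
                  ((bmOf grid).set (3 * PySem.Int.floordiv i 3
                      + PySem.Int.floordiv j 3).toNat
                    ((bmOf grid).getD (3 * PySem.Int.floordiv i 3
                        + PySem.Int.floordiv j 3).toNat 0 ||| (1 <<< v.toNat)))
                  ((PySem.List.remove? (c0 :: rest) (i, j)).getD (c0 :: rest)))
          conv_rhs => rw [← hemp]
          conv_rhs => rw [hfold, hsel2]
          show _ = (match altFree ((rmOf grid).getD ci.toNat 0 ||| (cmOf grid).getD cj.toNat 0 |||
                  (bmOf grid).getD (3 * PySem.Int.floordiv ci 3
                    + PySem.Int.floordiv cj 3).toNat 0) with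
              | [] => none
              | v :: _ =>
                alt_go n (upd grid ci cj v)
                  ((rmOf grid).set ci.toNat ((rmOf grid).getD ci.toNat 0 ||| (1 <<< v.toNat)))
                  ((cmOf grid).set cj.toNat ((cmOf grid).getD cj.toNat 0 ||| (1 <<< v.toNat)))
                  ((bmOf grid).set (3 * PySem.Int.floordiv ci 3
                      + PySem.Int.floordiv cj 3).toNat
                    ((bmOf grid).getD (3 * PySem.Int.floordiv ci 3
                        + PySem.Int.floordiv cj 3).toNat 0 ||| (1 <<< v.toNat)))
                  ((PySem.List.remove? (emptiesOf grid) (ci, cj)).getD (emptiesOf grid)))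
          rw [← hleq]
          cases hlg : get_legal_values ci cj grid with
          | nil => rfl
          | cons v vs =>
              have hvb : 1 ≤ v ∧ v ≤ 9 :=
                legal_mem_bounds grid ci cj v (by rw [hlg]; exact List.mem_cons_self)
              show solve_go n (upd grid ci cj v) = _
              show _ = alt_go n (upd grid ci cj v)
                  ((rmOf grid).set ci.toNat ((rmOf grid).getD ci.toNat 0 ||| (1 <<< v.toNat)))
                  ((cmOf grid).set cj.toNat ((cmOf grid).getD cj.toNat 0 ||| (1 <<< v.toNat)))
                  ((bmOf grid).set (3 * PySem.Int.floordiv ci 3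
                      + PySem.Int.floordiv cj 3).toNat
                    ((bmOf grid).getD (3 * PySem.Int.floordiv ci 3
                        + PySem.Int.floordiv cj 3).toNat 0 ||| (1 <<< v.toNat)))
                  ((PySem.List.remove? (emptiesOf grid) (ci, cj)).getD (emptiesOf grid))
              have hrm := rmOf_upd grid ci cj v hs hi0 hi9 hj0 hj9 hg0 hvb.1 hvb.2
              have hcm := cmOf_upd grid ci cj v hs hi0 hi9 hj0 hj9 hg0 hvb.1 hvb.2
              have hbm := bmOf_upd grid ci cj v hs hi0 hi9 hj0 hj9 hg0 hvb.1 hvb.2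
              have hemp' := empties_upd grid ci cj v hs hi0 hi9 hj0 hj9 hg0 hvb.1
              have hrem : (PySem.List.remove? (emptiesOf grid) (ci, cj)).getD (emptiesOf grid)
                  = emptiesOf (upd grid ci cj v) := by
                rw [PySem.List.remove?_eq_some_erase _ _ hselmem, Option.getD_some, hemp']
              rw [hrem, ← hrm, ← hcm, ← hbm]
              apply ih (upd grid ci cj v) (shape_upd grid ci cj v hs hi0 hi9)
              rw [hemp']
              have hlen := List.length_erase_of_mem hselmem
              rw [hemp] at hlt hlen ⊢
              simp only [List.length_cons] at hlt hlen
              omega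

-- ===== VERDICT (by name: the statement is the Claim_ definition above) =====
theorem solve_no_backtracking_spec : Claim_equal_solve_no_backtracking := by
  intro grid _ hpre
  unfold Spec_solve_no_backtracking
  show solve_go 82 grid = _
  unfold solve_no_backtracking_alt
  by_cases hc : alt_done grid = true
  · rw [if_pos hc]
    show (if is_complete grid then some grid else _) = _
    rw [if_pos (show is_complete grid = true from hc)]
  · rw [if_neg hc]
    have hsh : Shape grid := by
      rcases hpre with hall | hsh
      · exfalso
        apply hc
        unfold alt_done
        rw [List.all_eq_true]
        intro row hrow
        rw [List.all_eq_true]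
        intro cell hcell
        simpa using hall row hrow cell hcell
      · exact hsh
    have hlen : (emptiesOf grid).length < 82 := by
      rw [emptiesOf_eq]
      have h1 := List.length_filter_le (fun c => gcell grid c.1 c.2 == 0) allPairs
      rw [length_allPairs] at h1
      omega
    exact main_loop 82 grid hsh hlen
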